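-- pv_equiv track=rewrite | github.com/geniustom/RLGAN_Trade | DDQN_BestSell/trade_env.py | GetBestShortReward
-- ===== SOURCE A (Python) =====
-- def GetBestShortReward(pr,order_index):
-- 	order_index+=1 #從下一跟K棒起算
-- 	best_reward=0
-- 	best_high_index=0
-- 	best_low_index=0
-- 	for i in range(order_index,len(pr)):
-- 		for j in range(i,len(pr)):
-- 			if pr[i]-pr[j]>best_reward:
-- 				best_reward=pr[i]-pr[j]
-- 				best_high_index=i
-- 				best_low_index=j
--
-- 	return best_reward,best_high_index,best_low_index
-- ===== SOURCE B (Python) =====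
-- def GetBestShortReward(pr, order_index):
--     # one pass: track the earliest index of the running maximum price, O(n)
--     start = order_index + 1
--     best_reward = 0
--     best_high_index = 0
--     best_low_index = 0
--     max_i = start
--     for j in range(start, len(pr)):
--         if pr[j] > pr[max_i]:
--             max_i = j
--         if pr[max_i] - pr[j] > best_reward:
--             best_reward = pr[max_i] - pr[j]
--             best_high_index = max_i
--             best_low_index = j
--     return best_reward, best_high_index, best_low_index
-- ===== Notes on version B (the rewrite author's own statement) =====
-- stated objective: faster
-- what changed: replaced the nested quadratic scan over all pairs (i,j) with a single left-to-right pass that tracks the earliest index of the running maximum price, updating the best drop once per element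
import Mathlib
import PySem

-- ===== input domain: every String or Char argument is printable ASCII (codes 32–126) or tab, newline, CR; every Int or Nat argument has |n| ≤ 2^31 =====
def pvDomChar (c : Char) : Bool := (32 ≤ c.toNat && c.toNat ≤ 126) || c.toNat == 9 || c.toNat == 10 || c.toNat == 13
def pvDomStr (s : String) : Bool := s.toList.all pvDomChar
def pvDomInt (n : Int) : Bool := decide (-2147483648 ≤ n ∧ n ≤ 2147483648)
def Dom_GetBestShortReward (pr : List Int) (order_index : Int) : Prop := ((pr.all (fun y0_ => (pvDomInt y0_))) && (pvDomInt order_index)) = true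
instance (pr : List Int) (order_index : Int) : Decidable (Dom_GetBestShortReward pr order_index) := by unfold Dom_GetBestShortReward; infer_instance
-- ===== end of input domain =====

-- B replaces A's quadratic all-pairs scan by a single pass that tracks the earliest index of the
-- running maximum price (objective: faster, O(n^2) → O(n); same return value on all of Pre_).

-- ===== PORT A =====
def GetBestShortReward (pr : List Int) (order_index : Int) : Int × Int × Int :=
  let oi := order_index + 1
  (PySem.List.pyRange oi (PySem.List.len pr) 1).foldl
    (fun st i =>
      (PySem.List.pyRange i (PySem.List.len pr) 1).foldl
        (fun st j =>
          if PySem.List.pyGetD pr i 0 - PySem.List.pyGetD pr j 0 > st.1 then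
            (PySem.List.pyGetD pr i 0 - PySem.List.pyGetD pr j 0, i, j)
          else st)
        st)
    (0, 0, 0)

-- ===== PORT B =====
def GetBestShortReward_alt (pr : List Int) (order_index : Int) : Int × Int × Int :=
  let start := order_index + 1
  let r :=
    (PySem.List.pyRange start (PySem.List.len pr) 1).foldl
      (fun (st : (Int × Int × Int) × Int) j =>
        let mi := if PySem.List.pyGetD pr j 0 > PySem.List.pyGetD pr st.2 0 then j else st.2
        let best :=
          if PySem.List.pyGetD pr mi 0 - PySem.List.pyGetD pr j 0 > st.1.1 then
            (PySem.List.pyGetD pr mi 0 - PySem.List.pyGetD pr j 0, mi, j)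
          else st.1
        (best, mi))
      ((0, 0, 0), start)
  r.1

-- ===== PRECONDITION & SPEC =====
-- Pre_ excludes exactly the inputs where Python A raises IndexError: the loops start at
-- order_index+1, and when that is below -len(pr) the very first access pr[order_index+1] raises.
def Pre_GetBestShortReward (pr : List Int) (order_index : Int) : Prop :=
  -(pr.length : Int) ≤ order_index + 1
instance (pr : List Int) (order_index : Int) : Decidable (Pre_GetBestShortReward pr order_index) := by unfold Pre_GetBestShortReward; infer_instance

def pvWitness_GetBestShortReward : List Int × Int := ([3, 1, 2], 0)

def Spec_GetBestShortReward (pr : List Int) (order_index : Int) (out : Int × Int × Int) : Prop := out = GetBestShortReward_alt pr order_index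
instance (pr : List Int) (order_index : Int) (out : Int × Int × Int) : Decidable (Spec_GetBestShortReward pr order_index out) := by unfold Spec_GetBestShortReward; infer_instance

-- ===== CLAIM (what is proved, stated in full; the proofs are below) =====
def Claim_equal_GetBestShortReward : Prop := ∀ (pr : List Int) (order_index : Int), Dom_GetBestShortReward pr order_index → Pre_GetBestShortReward pr order_index → Spec_GetBestShortReward pr order_index (GetBestShortReward pr order_index)

-- ===== LEMMAS AND PROOFS =====

-- "take the candidate if strictly better" — the update both loops perform
def pvUpd (st c : Int × Int × Int) : Int × Int × Int := if c.1 > st.1 then c else st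

-- earliest index of the maximum of w over 0..k (B's running max index, shifted to offsets)
def pvMu (w : Nat → Int) : Nat → Nat
  | 0 => 0
  | k+1 => if w (k+1) > w (pvMu w k) then k+1 else pvMu w k

def pvCand (s : Int) (w : Nat → Int) (a b : Nat) : Int × Int × Int :=
  (w a - w b, s + (a : Int), s + (b : Int))

def pvG (s : Int) (w : Nat → Int) (b : Nat) : Int × Int × Int := pvCand s w (pvMu w b) b

def pvRow (s : Int) (w : Nat → Int) (ℓ a : Nat) : List (Int × Int × Int) :=
  (List.range' a (ℓ - a)).map (pvCand s w a)

def pvCA (s : Int) (w : Nat → Int) (ℓ : Nat) : List (Int × Int × Int) :=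
  (List.range ℓ).flatMap (pvRow s w ℓ)

def pvCB (s : Int) (w : Nat → Int) (ℓ : Nat) : List (Int × Int × Int) :=
  (List.range ℓ).map (pvG s w)

-- B's loop body, abstracted over the price lookup
def pvBstep (v : Int → Int) (st : (Int × Int × Int) × Int) (j : Int) : (Int × Int × Int) × Int :=
  let mi := if v j > v st.2 then j else st.2
  (if v mi - v j > st.1.1 then (v mi - v j, mi, j) else st.1, mi)

-- characterization of `foldl pvUpd`: the result is the initial state, or the FIRST candidate
-- achieving the running maximum
def pvIsSel (C : List (Int × Int × Int)) (st r : Int × Int × Int) : Prop :=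
  ((∀ c ∈ C, c.1 ≤ st.1) ∧ r = st) ∨
  (∃ C1 C2, C = C1 ++ r :: C2 ∧ st.1 < r.1 ∧ (∀ c ∈ C1, c.1 < r.1) ∧ (∀ c ∈ C2, c.1 ≤ r.1))

lemma foldl_pvUpd_of_all_le (C : List (Int × Int × Int)) (st : Int × Int × Int)
    (h : ∀ c ∈ C, c.1 ≤ st.1) : C.foldl pvUpd st = st := by
  induction C with
  | nil => rfl
  | cons c C ih =>
    have hc : ¬ (c.1 > st.1) := not_lt.2 (h c (by simp))
    simp only [List.foldl_cons, pvUpd, if_neg hc]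
    exact ih (fun d hd => h d (by simp [hd]))

lemma pvIsSel_foldl (C : List (Int × Int × Int)) (st : Int × Int × Int) :
    pvIsSel C st (C.foldl pvUpd st) := by
  induction C generalizing st with
  | nil => exact Or.inl ⟨by simp, rfl⟩
  | cons c C ih =>
    simp only [List.foldl_cons]
    by_cases hc : c.1 > st.1
    · rw [show pvUpd st c = c from if_pos hc]
      rcases ih c with ⟨hle, hr⟩ | ⟨C1, C2, hdec, hlt, h1, h2⟩
      · exact Or.inr ⟨[], C, by rw [hr]; rfl, by rw [hr]; exact hc,
          by simp, fun d hd => by rw [hr]; exact hle d hd⟩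
      · exact Or.inr ⟨c :: C1, C2, congrArg (c :: ·) hdec, lt_trans hc hlt, by
          intro d hd
          rcases List.mem_cons.mp hd with rfl | hd
          · exact hlt
          · exact h1 d hd, h2⟩
    · rw [show pvUpd st c = st from if_neg hc]
      rcases ih st with ⟨hle, hr⟩ | ⟨C1, C2, hdec, hlt, h1, h2⟩
      · exact Or.inl ⟨by
          intro d hd
          rcases List.mem_cons.mp hd with rfl | hd
          · exact not_lt.1 hc
          · exact hle d hd, hr⟩
      · exact Or.inr ⟨c :: C1, C2, congrArg (c :: ·) hdec, hlt, by
          intro d hd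
          rcases List.mem_cons.mp hd with rfl | hd
          · exact lt_of_le_of_lt (not_lt.1 hc) hlt
          · exact h1 d hd, h2⟩

lemma foldl_eq_of_pvIsSel (C : List (Int × Int × Int)) (st x : Int × Int × Int)
    (h : pvIsSel C st x) : C.foldl pvUpd st = x := by
  induction C generalizing st with
  | nil =>
    rcases h with ⟨_, hx⟩ | ⟨C1, C2, hdec, _⟩
    · simpa using hx.symm
    · exact absurd hdec (by simp)
  | cons c C ih =>
    simp only [List.foldl_cons]
    rcases h with ⟨hle, hx⟩ | ⟨C1, C2, hdec, hlt, h1, h2⟩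
    · have hc : ¬ (c.1 > st.1) := not_lt.2 (hle c (by simp))
      rw [show pvUpd st c = st from if_neg hc]
      exact ih st (Or.inl ⟨fun d hd => hle d (by simp [hd]), hx⟩)
    · cases C1 with
      | nil =>
        simp only [List.nil_append, List.cons.injEq] at hdec
        obtain ⟨rfl, rfl⟩ := hdec
        rw [show pvUpd st c = c from if_pos hlt]
        exact foldl_pvUpd_of_all_le _ _ h2
      | cons d C1 =>
        simp only [List.cons_append, List.cons.injEq] at hdec
        obtain ⟨rfl, hdec⟩ := hdec
        have hcx : c.1 < x.1 := h1 c (by simp)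
        have hx : (pvUpd st c).1 < x.1 := by
          unfold pvUpd; split_ifs <;> [exact hcx; exact hlt]
        exact ih (pvUpd st c)
          (Or.inr ⟨C1, C2, hdec, hx, fun e he => h1 e (by simp [he]), h2⟩)

-- pvMu facts
lemma pvMu_succ (w : Nat → Int) (k : Nat) :
    pvMu w (k+1) = if w (k+1) > w (pvMu w k) then k+1 else pvMu w k := rfl
-- pvMu facts
lemma pvMu_le (w : Nat → Int) (k : Nat) : pvMu w k ≤ k := by
  induction k with
  | zero => simp [pvMu]
  | succ k ih => unfold pvMu; split_ifs <;> omega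

lemma pvMu_max (w : Nat → Int) {t k : Nat} (h : t ≤ k) : w t ≤ w (pvMu w k) := by
  induction k with
  | zero => simp_all [pvMu]
  | succ k ih =>
    unfold pvMu
    rcases Nat.eq_or_lt_of_le h with rfl | h'
    · split_ifs <;> simp_all
    · have ht : t ≤ k := by omega
      split_ifs with hw
      · exact le_of_lt (lt_of_le_of_lt (ih ht) hw)
      · exact ih ht

lemma pvMu_first (w : Nat → Int) {t k : Nat} (h : t < pvMu w k) : w t < w (pvMu w k) := by
  induction k with
  | zero => simp [pvMu] at h
  | succ k ih =>
    unfold pvMu at h ⊢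
    split_ifs at h ⊢ with hw
    · exact lt_of_le_of_lt (pvMu_max w (by omega)) hw
    · exact ih h

lemma pvMu_mono (w : Nat → Int) {k k' : Nat} (h : k ≤ k') : pvMu w k ≤ pvMu w k' := by
  have : Monotone (pvMu w) := monotone_nat_of_le_succ (by
    intro n
    rw [pvMu_succ]
    split_ifs with hw
    · exact Nat.le_succ_of_le (pvMu_le w n)
    · exact le_refl _)
  exact this h

-- membership shape of the candidate lists
lemma mem_pvRow {s : Int} {w : Nat → Int} {ℓ a : Nat} {c : Int × Int × Int}
    (h : c ∈ pvRow s w ℓ a) : ∃ b, a ≤ b ∧ b < ℓ ∧ c = pvCand s w a b := by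
  obtain ⟨b, hb, rfl⟩ := List.mem_map.mp h
  rw [List.mem_range'_1] at hb
  exact ⟨b, hb.1, by omega, rfl⟩

lemma mem_pvCA {s : Int} {w : Nat → Int} {ℓ : Nat} {c : Int × Int × Int}
    (h : c ∈ pvCA s w ℓ) : ∃ a b, a ≤ b ∧ b < ℓ ∧ c = pvCand s w a b := by
  obtain ⟨a, _, hrow⟩ := List.mem_flatMap.mp h
  obtain ⟨b, h1, h2, rfl⟩ := mem_pvRow hrow
  exact ⟨a, b, h1, h2, rfl⟩

-- ===== the core combinatorial fact: A's all-pairs scan and B's prefix-max scan select =====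
-- ===== the same triple                                                               =====
lemma pv_range_split {ℓ m : Nat} (h : m ≤ ℓ) :
    List.range ℓ = List.range m ++ List.range' m (ℓ - m) := by
  rw [List.range'_eq_map_range, ← List.range_add, Nat.add_sub_cancel' h]

lemma pv_range'_split {a b ℓ : Nat} (h1 : a ≤ b) (h2 : b ≤ ℓ) :
    List.range' a (ℓ - a) = List.range' a (b - a) ++ List.range' b (ℓ - b) := by
  have h := List.range'_append (s := a) (m := b - a) (n := ℓ - b) (step := 1)
  have e1 : a + 1 * (b - a) = b := by omega
  have e2 : (b - a) + (ℓ - b) = ℓ - a := by omega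
  rw [e1, e2] at h
  exact h.symm

lemma pv_core (s : Int) (w : Nat → Int) (ℓ : Nat) :
    (pvCA s w ℓ).foldl pvUpd (0, 0, 0) = (pvCB s w ℓ).foldl pvUpd (0, 0, 0) := by
  rcases pvIsSel_foldl (pvCB s w ℓ) (0, 0, 0) with ⟨hle, hr⟩ | ⟨C1, C2, hdec, hpos, h1, h2⟩
  · rw [hr]
    apply foldl_pvUpd_of_all_le
    intro c hc
    obtain ⟨a, b, hab, hb, rfl⟩ := mem_pvCA hc
    have hwa : w a ≤ w (pvMu w b) := pvMu_max w hab
    have hg : (pvG s w b).1 ≤ (0 : Int) :=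
      hle _ (List.mem_map.mpr ⟨b, List.mem_range.mpr hb, rfl⟩)
    simp only [pvG, pvCand] at hg ⊢
    linarith
  · apply foldl_eq_of_pvIsSel
    set r := (pvCB s w ℓ).foldl pvUpd (0, 0, 0) with hrdef
    unfold pvCB at hdec
    obtain ⟨l1, l2, hsplit, hC1, hl2⟩ := List.map_eq_append_iff.mp hdec
    obtain ⟨bstar, l2', hl2eq, hgb, hmapl2'⟩ := List.map_eq_cons_iff.mp hl2
    subst hl2eq
    have hbmem : bstar < ℓ := by
      have : bstar ∈ List.range ℓ := by
        rw [hsplit]; exact List.mem_append.mpr (Or.inr (List.mem_cons_self))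
      exact List.mem_range.mp this
    have hpw := List.pairwise_lt_range (n := ℓ)
    rw [hsplit] at hpw
    rcases List.pairwise_append.mp hpw with ⟨_, hp2, hp12⟩
    have hl1lt : ∀ x ∈ l1, x < bstar := fun x hx => hp12 x hx bstar List.mem_cons_self
    have hl2gt : ∀ y ∈ l2', bstar < y := (List.pairwise_cons.mp hp2).1
    have hlt : ∀ b : Nat, b < bstar → (pvG s w b).1 < r.1 := by
      intro b hbb
      have hbl : b ∈ l1 := by
        have hbr : b ∈ List.range ℓ := List.mem_range.mpr (lt_trans hbb hbmem)
        rw [hsplit] at hbr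
        rcases List.mem_append.mp hbr with h | h
        · exact h
        · rcases List.mem_cons.mp h with rfl | h
          · omega
          · exact absurd (hl2gt _ h) (by omega)
      exact h1 _ (hC1 ▸ List.mem_map_of_mem hbl)
    have hle' : ∀ b : Nat, b < ℓ → (pvG s w b).1 ≤ r.1 := by
      intro b hb
      have hbr : b ∈ List.range ℓ := List.mem_range.mpr hb
      rw [hsplit] at hbr
      rcases List.mem_append.mp hbr with h | h
      · exact le_of_lt (h1 _ (hC1 ▸ List.mem_map_of_mem h))
      · rcases List.mem_cons.mp h with rfl | h
        · exact le_of_eq (by rw [hgb])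
        · exact h2 _ (hmapl2' ▸ List.mem_map_of_mem h)
    set astar := pvMu w bstar with hastar
    have hab : astar ≤ bstar := pvMu_le w bstar
    have hrG : r = pvCand s w astar bstar := by rw [← hgb]; rfl
    right
    refine ⟨((List.range astar).flatMap (pvRow s w ℓ)) ++
              (List.range' astar (bstar - astar)).map (pvCand s w astar),
            ((List.range' (bstar + 1) (ℓ - (bstar + 1))).map (pvCand s w astar)) ++
              ((List.range' (astar + 1) (ℓ - (astar + 1))).flatMap (pvRow s w ℓ)),
            ?_, hpos, ?_, ?_⟩
    · unfold pvCA
      rw [pv_range_split (show astar ≤ ℓ by omega), List.flatMap_append,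
        show ℓ - astar = (ℓ - (astar + 1)) + 1 by omega, List.range'_succ, List.flatMap_cons]
      have hrow : pvRow s w ℓ astar =
          (List.range' astar (bstar - astar)).map (pvCand s w astar) ++
            pvCand s w astar bstar ::
              (List.range' (bstar + 1) (ℓ - (bstar + 1))).map (pvCand s w astar) := by
        unfold pvRow
        rw [pv_range'_split hab (le_of_lt hbmem),
          show ℓ - bstar = (ℓ - (bstar + 1)) + 1 by omega, List.range'_succ,
          List.map_append, List.map_cons]
      rw [hrow, ← hrG]
      simp [List.append_assoc]
    · intro c hc
      rcases List.mem_append.mp hc with hc | hc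
      · obtain ⟨a, ha, hrowmem⟩ := List.mem_flatMap.mp hc
        obtain ⟨b, hab', hb, rfl⟩ := mem_pvRow hrowmem
        rw [List.mem_range] at ha
        by_contra hcon
        push Not at hcon
        simp only [pvCand] at hcon
        have hwa : w a ≤ w (pvMu w b) := pvMu_max w hab'
        have hgle : (pvG s w b).1 ≤ r.1 := hle' b hb
        simp only [pvG, pvCand] at hgle
        have hbge : bstar ≤ b := by
          by_contra hblt
          push Not at hblt
          have hx := hlt b hblt
          simp only [pvG, pvCand] at hx
          linarith
        have hmono : astar ≤ pvMu w b := pvMu_mono w hbge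
        have hfirst : w a < w (pvMu w b) := pvMu_first w (lt_of_lt_of_le ha hmono)
        linarith
      · obtain ⟨b, hbmem', rfl⟩ := List.mem_map.mp hc
        rw [List.mem_range'_1] at hbmem'
        have hbb : b < bstar := by omega
        by_contra hcon
        push Not at hcon
        simp only [pvCand] at hcon
        have hwa : w astar ≤ w (pvMu w b) := pvMu_max w hbmem'.1
        have hx := hlt b hbb
        simp only [pvG, pvCand] at hx
        linarith
    · intro c hc
      have hshape : ∃ a b, a ≤ b ∧ b < ℓ ∧ c = pvCand s w a b := by
        rcases List.mem_append.mp hc with hc | hc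
        · obtain ⟨b, hb, rfl⟩ := List.mem_map.mp hc
          rw [List.mem_range'_1] at hb
          exact ⟨astar, b, by omega, by omega, rfl⟩
        · obtain ⟨a, _, hrowmem⟩ := List.mem_flatMap.mp hc
          obtain ⟨b, hab', hbl, rfl⟩ := mem_pvRow hrowmem
          exact ⟨a, b, hab', hbl, rfl⟩
      obtain ⟨a, b, hab', hb, rfl⟩ := hshape
      have hwa : w a ≤ w (pvMu w b) := pvMu_max w hab'
      have hgle := hle' b hb
      simp only [pvG, pvCand] at hgle ⊢
      linarith

-- ===== normal forms of the two ports =====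
lemma B_loop (v : Int → Int) (s : Int) (k : Nat) :
    (List.range (k+1)).foldl (fun st (a : Nat) => pvBstep v st (s + (a : Int))) ((0,0,0), s)
    = (((List.range (k+1)).map (pvG s (fun a => v (s + (a : Int))))).foldl pvUpd (0,0,0),
       s + (pvMu (fun a => v (s + (a : Int))) k : Int)) := by
  induction k with
  | zero =>
    simp [pvBstep, pvG, pvCand, pvMu, pvUpd]
  | succ k ih =>
    rw [List.range_succ, List.foldl_append, List.map_append, List.foldl_append, ih]
    simp only [List.foldl_cons, List.foldl_nil, List.map_cons, List.map_nil]
    unfold pvBstep pvG pvCand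
    rw [pvMu_succ]
    split_ifs with hw <;> simp only [pvUpd]

lemma A_main (v : Int → Int) (s n : Int) :
    (PySem.List.pyRange s n 1).foldl
      (fun st i => (PySem.List.pyRange i n 1).foldl
        (fun st j => if v i - v j > st.1 then (v i - v j, i, j) else st) st) (0,0,0)
    = (pvCA s (fun a => v (s + (a : Int))) ((n - s).toNat)).foldl pvUpd (0,0,0) := by
  rw [PySem.List.pyRange_one, List.foldl_map]
  unfold pvCA
  rw [List.foldl_flatMap]
  apply PySem.List.foldl_congr_mem
  intro st a ha
  rw [List.mem_range] at ha
  rw [PySem.List.pyRange_one, List.foldl_map]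
  unfold pvRow
  rw [List.range'_eq_map_range, List.map_map, List.foldl_map]
  have hlen : (n - (s + (a : Int))).toNat = (n - s).toNat - a := by omega
  rw [hlen]
  apply PySem.List.foldl_congr_mem
  intro st k _
  have hc : s + ((a + k : Nat) : Int) = s + (a : Int) + (k : Int) := by push_cast; ring
  simp only [Function.comp, pvUpd, pvCand, hc]

lemma A_nf (pr : List Int) (oi : Int) :
    GetBestShortReward pr oi =
      (pvCA (oi + 1) (fun a => PySem.List.pyGetD pr (oi + 1 + (a : Int)) 0)
        (((pr.length : Int) - (oi + 1)).toNat)).foldl pvUpd (0, 0, 0) := by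
  exact A_main (fun i => PySem.List.pyGetD pr i 0) (oi + 1) (pr.length : Int)

lemma B_main (v : Int → Int) (s n : Int) :
    ((PySem.List.pyRange s n 1).foldl (fun st j => pvBstep v st j) ((0,0,0), s)).1
    = (pvCB s (fun a => v (s + (a : Int))) ((n - s).toNat)).foldl pvUpd (0,0,0) := by
  rw [PySem.List.pyRange_one, List.foldl_map]
  rcases h : (n - s).toNat with _ | k
  · simp [pvCB]
  · rw [show (List.range (k+1)).foldl (fun st (a : Nat) => pvBstep v st (s + (a : Int))) ((0,0,0), s)
        = _ from B_loop v s k]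
    rfl

lemma B_nf (pr : List Int) (oi : Int) :
    GetBestShortReward_alt pr oi =
      (pvCB (oi + 1) (fun a => PySem.List.pyGetD pr (oi + 1 + (a : Int)) 0)
        (((pr.length : Int) - (oi + 1)).toNat)).foldl pvUpd (0, 0, 0) := by
  exact B_main (fun i => PySem.List.pyGetD pr i 0) (oi + 1) (pr.length : Int)

-- ===== VERDICT (by name: the statement is the Claim_ definition above) =====
theorem GetBestShortReward_spec : Claim_equal_GetBestShortReward := by
  intro pr oi _ _
  unfold Spec_GetBestShortReward
  rw [A_nf, B_nf, pv_core]
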